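-- pv_equiv track=rewrite | github.com/Bharath-kolekar/cogone | quarantine/ai_orchestration_refactor_20251009/ai_orchestration_validators.py | _check_imports_first
-- ===== SOURCE A (Python) =====
-- def _check_imports_first(code: str) -> bool:
--     """Check if imports are at the top"""
--     lines = code.split('\n')
--     import_lines = []
--     other_lines = []
--
--     for i, line in enumerate(lines):
--         if line.strip().startswith(('import ', 'from ')):
--             import_lines.append(i)
--         elif line.strip() and not line.strip().startswith('#'):
--             other_lines.append(i)
--
--     if not import_lines or not other_lines:
--         return True
--
--     return max(import_lines) < min(other_lines)
-- ===== SOURCE B (Python) =====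
-- def _check_imports_first(code: str) -> bool:
--     """Check if imports are at the top"""
--     seen_code = False
--     for line in code.split('\n'):
--         s = line.strip()
--         if s.startswith(('import ', 'from ')):
--             if seen_code:
--                 return False
--         elif s and not s.startswith('#'):
--             seen_code = True
--     return True
-- ===== Notes on version B (the rewrite author's own statement) =====
-- stated objective: simpler
-- what changed: Replaces the two collected index lists plus a max/min comparison with a single boolean seen_code flag and an immediate False on the first import that follows non-import code.
import Mathlib
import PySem

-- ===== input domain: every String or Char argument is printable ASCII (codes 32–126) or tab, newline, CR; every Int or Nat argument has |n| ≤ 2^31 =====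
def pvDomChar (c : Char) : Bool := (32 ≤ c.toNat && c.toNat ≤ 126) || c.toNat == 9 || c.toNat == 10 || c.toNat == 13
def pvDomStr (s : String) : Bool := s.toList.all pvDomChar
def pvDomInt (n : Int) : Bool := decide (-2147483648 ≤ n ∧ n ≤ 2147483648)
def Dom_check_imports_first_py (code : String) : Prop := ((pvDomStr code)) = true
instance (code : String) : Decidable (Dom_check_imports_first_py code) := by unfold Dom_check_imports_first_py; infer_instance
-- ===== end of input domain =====

-- B replaces A's two collected index lists and max/min comparison with a single
-- seen_code boolean and an early False on the first import after other code (objective: simpler).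


-- ===== PORT A =====
-- startswith(('import ', 'from ')) — a tuple argument is a disjunction of startswith tests (exact)
def aStep (acc : List Int × List Int) (p : Int × String) : List Int × List Int :=
  if PySem.Str.startswith (PySem.Str.strip p.2) "import " ||
     PySem.Str.startswith (PySem.Str.strip p.2) "from " then
    (acc.1 ++ [p.1], acc.2)
  else if PySem.Str.strip p.2 != "" && !PySem.Str.startswith (PySem.Str.strip p.2) "#" then
    (acc.1, acc.2 ++ [p.1])
  else acc

def aFinish (import_lines other_lines : List Int) : Bool :=
  if import_lines.isEmpty || other_lines.isEmpty then true
  else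
    match PySem.List.max? import_lines (fun x => x), PySem.List.min? other_lines (fun x => x) with
    | some a, some b => decide (a < b)
    | _, _ => true

def check_imports_first_py (code : String) : Bool :=
  -- code.split('\n'): sep is the nonempty literal "\n", so split? is always some; getD [] is exact
  let lines := (PySem.Str.split? code "\n").getD []
  let acc := (PySem.List.enumerate lines).foldl aStep ([], [])
  aFinish acc.1 acc.2

-- ===== PORT B =====
def altLoop (lines : List String) (seen_code : Bool) : Bool :=
  match lines with
  | [] => true
  | line :: rest =>
    let s := PySem.Str.strip line
    if PySem.Str.startswith s "import " || PySem.Str.startswith s "from " then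
      if seen_code then false else altLoop rest seen_code
    else if s != "" && !PySem.Str.startswith s "#" then altLoop rest true
    else altLoop rest seen_code

def check_imports_first_py_alt (code : String) : Bool :=
  altLoop ((PySem.Str.split? code "\n").getD []) false

-- ===== PRECONDITION & SPEC =====
def Spec_check_imports_first_py (code : String) (out : Bool) : Prop := out = check_imports_first_py_alt code
instance (code : String) (out : Bool) : Decidable (Spec_check_imports_first_py code out) := by unfold Spec_check_imports_first_py; infer_instance

-- ===== CLAIM (what is proved, stated in full; the proofs are below) =====
def Claim_equal_check_imports_first_py : Prop := ∀ (code : String), Dom_check_imports_first_py code → Spec_check_imports_first_py code (check_imports_first_py code)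

-- ===== LEMMAS AND PROOFS =====

lemma altLoop_cons (l : String) (rest : List String) (seen : Bool) :
    altLoop (l :: rest) seen =
      (if PySem.Str.startswith (PySem.Str.strip l) "import " ||
          PySem.Str.startswith (PySem.Str.strip l) "from " then
        if seen then false else altLoop rest seen
      else if PySem.Str.strip l != "" && !PySem.Str.startswith (PySem.Str.strip l) "#" then
        altLoop rest true
      else altLoop rest seen) := rfl

-- appending one index larger than everything in both lists to other_lines does not change aFinish
lemma aFinish_append_other (imp oth : List Int) (i : Int)
    (himp : ∀ x ∈ imp, x < i) (hoth : ∀ x ∈ oth, x < i) :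
    aFinish imp (oth ++ [i]) = aFinish imp oth := by
  unfold aFinish
  cases imp with
  | nil => simp
  | cons a as =>
    cases oth with
    | nil =>
      simp only [List.isEmpty_cons, List.nil_append, List.isEmpty_nil,
        Bool.or_false, Bool.or_true, if_true]
      rw [if_neg (by simp)]
      have hmax := PySem.List.max?_eq_none_iff (a :: as) (fun x => x)
      cases hm : PySem.List.max? (a :: as) (fun x => x) with
      | none => simp [hm] at hmax
      | some m =>
        have hmem := PySem.List.max?_mem hm
        have : m < i := himp m hmem
        simp [PySem.List.min?_id_cons, this]
    | cons o os =>
      simp only [List.isEmpty_cons, List.cons_append, Bool.or_self]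
      have hb := PySem.List.min?_id_cons o os
      have hbmem := PySem.List.min?_mem hb
      have hlt : List.foldl min o os < i := hoth _ hbmem
      have : PySem.List.min? (o :: (os ++ [i])) (fun y => y) = some (List.foldl min o os) := by
        rw [PySem.List.min?_id_cons]
        simp [List.foldl_append, min_eq_left (le_of_lt hlt)]
      rw [this, hb]

-- appending an index larger than everything in other_lines to import_lines makes aFinish false
-- (when other_lines is nonempty)
lemma aFinish_append_import_false (imp : List Int) (o : Int) (os : List Int) (i : Int)
    (hoth : ∀ x ∈ o :: os, x < i) :
    aFinish (imp ++ [i]) (o :: os) = false := by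
  unfold aFinish
  rw [if_neg (by simp)]
  cases hm : PySem.List.max? (imp ++ [i]) (fun x => x) with
  | none =>
    exact absurd ((PySem.List.max?_eq_none_iff _ _).mp hm) (by simp)
  | some m =>
    have hge : i ≤ m := PySem.List.max?_isMax hm i (by simp)
    cases hb : PySem.List.min? (o :: os) (fun x => x) with
    | none => exact absurd ((PySem.List.min?_eq_none_iff _ _).mp hb) (by simp)
    | some b =>
      have hbmem := PySem.List.min?_mem hb
      have : b < i := hoth _ hbmem
      simp only [decide_eq_false_iff_not, not_lt]
      omega

-- main loop correspondence: A's fold-then-finish equals B's flag loop (anded with the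
-- finish value of the accumulators, which start as ([], []))
lemma loop_eq (ls : List String) : ∀ (i : Int) (imp oth : List Int),
    (∀ x ∈ imp, x < i) → (∀ x ∈ oth, x < i) →
    (let acc := (PySem.List.enumerate ls i).foldl aStep (imp, oth)
     aFinish acc.1 acc.2) = (altLoop ls (!oth.isEmpty) && aFinish imp oth) := by
  induction ls with
  | nil =>
    intro i imp oth _ _
    simp [PySem.List.enumerate, altLoop]
  | cons l rest ih =>
    intro i imp oth himp hoth
    rw [PySem.List.enumerate_cons]
    simp only [List.foldl_cons]
    by_cases h1 : (PySem.Str.startswith (PySem.Str.strip l) "import " ||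
        PySem.Str.startswith (PySem.Str.strip l) "from ") = true
    · -- import line
      have hstep : aStep (imp, oth) (i, l) = (imp ++ [i], oth) := by
        unfold aStep; rw [if_pos h1]
      rw [hstep]
      rw [ih (i + 1) (imp ++ [i]) oth
        (by intro x hx; rcases List.mem_append.mp hx with h | h
            · exact lt_trans (himp x h) (by omega)
            · simp at h; omega)
        (fun x hx => lt_trans (hoth x hx) (by omega))]
      cases oth with
      | nil =>
        simp only [List.isEmpty_nil, Bool.not_true]
        rw [show altLoop (l :: rest) false = altLoop rest false by
          rw [altLoop_cons, if_pos h1]; rfl]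
        have h2 : aFinish (imp ++ [i]) [] = true := by unfold aFinish; simp
        have h3 : aFinish imp [] = true := by unfold aFinish; simp
        rw [h2, h3]
      | cons o os =>
        simp only [List.isEmpty_cons, Bool.not_false]
        rw [show altLoop (l :: rest) true = false by rw [altLoop_cons, if_pos h1]; rfl]
        rw [aFinish_append_import_false imp o os i hoth]
        simp
    · -- not an import line
      by_cases h2 : (PySem.Str.strip l != "" && !PySem.Str.startswith (PySem.Str.strip l) "#") = true
      · -- other (code) line
        have hstep : aStep (imp, oth) (i, l) = (imp, oth ++ [i]) := by
          unfold aStep; rw [if_neg h1, if_pos h2]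
        rw [hstep]
        rw [ih (i + 1) imp (oth ++ [i])
          (fun x hx => lt_trans (himp x hx) (by omega))
          (by intro x hx; rcases List.mem_append.mp hx with h | h
              · exact lt_trans (hoth x h) (by omega)
              · simp at h; omega)]
        rw [show altLoop (l :: rest) (!oth.isEmpty) = altLoop rest true by
          rw [altLoop_cons, if_neg h1, if_pos h2]]
        rw [show (!(oth ++ [i]).isEmpty) = true by simp]
        rw [aFinish_append_other imp oth i himp hoth]
      · -- blank or comment line
        have hstep : aStep (imp, oth) (i, l) = (imp, oth) := by
          unfold aStep; rw [if_neg h1, if_neg h2]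
        rw [hstep]
        rw [ih (i + 1) imp oth
          (fun x hx => lt_trans (himp x hx) (by omega))
          (fun x hx => lt_trans (hoth x hx) (by omega))]
        rw [show altLoop (l :: rest) (!oth.isEmpty) = altLoop rest (!oth.isEmpty) by
          rw [altLoop_cons, if_neg h1, if_neg h2]]

-- ===== VERDICT (by name: the statement is the Claim_ definition above) =====
theorem check_imports_first_py_spec : Claim_equal_check_imports_first_py := by
  intro code _
  unfold Spec_check_imports_first_py check_imports_first_py check_imports_first_py_alt
  have := loop_eq ((PySem.Str.split? code "\n").getD []) 0 [] []
    (by intro x hx; simp at hx) (by intro x hx; simp at hx)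
  simp only at this
  rw [this]
  have : aFinish [] [] = true := by unfold aFinish; simp
  rw [this]
  simp
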